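-- pv_equiv track=rewrite | github.com/tomaslibson/Algo-1-python | yago2.py | stock_productos
-- ===== SOURCE A (Python) =====
-- def stock_productos(s: list[(str, int)]) -> dict:
--
--     res = {}
--
--     for (producto, precio) in s:
--         res[producto] = [precio,precio]
--
--     for (producto, precio) in s:
--         for (producto2,precio2) in s:
--             if producto == producto2:
--                 if precio2 < precio:
--                     res[producto][0] = precio2
--                 if precio2 > precio:
--                     res[producto][1] = precio2
--
--     return lista_a_tupla (res)
--
-- def lista_a_tupla(d: dict) -> dict:
--     res = {}
--
--     for (k,[min, max]) in d.items():
--         res[k] = (min,max)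
--     return res
-- ===== SOURCE B (Python) =====
-- def stock_productos(s: list[(str, int)]) -> dict:
--     grupos = {}
--     for (producto, precio) in s:
--         grupos[producto] = grupos.get(producto, []) + [precio]
--     return {producto: (min(precios), max(precios)) for (producto, precios) in grupos.items()}
-- ===== Notes on version B (the rewrite author's own statement) =====
-- stated objective: faster
-- what changed: Replaces the all-pairs O(n^2) scan that repeatedly rewrites res[producto] with a single grouping pass (product -> list of its prices) followed by min/max per group.
-- intended difference: On inputs where, for some product, the last price listed strictly below (resp. above) its final price is not that product's lowest (resp. highest) price - e.g. [('p',1),('p',2),('p',3)] - A returns that stale last-seen bound ({'p': (2, 3)} there) because its inner loop keeps overwriting the bound with the latest qualifying price, while B returns the true per-product (min, max) ({'p': (1, 3)}), which is evidently what the function is for. — e.g. on stock_productos([("p", 1), ("p", 2), ("p", 3)]): A returns [("p", 2, 3)], B returns [("p", 1, 3)]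
import Mathlib
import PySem

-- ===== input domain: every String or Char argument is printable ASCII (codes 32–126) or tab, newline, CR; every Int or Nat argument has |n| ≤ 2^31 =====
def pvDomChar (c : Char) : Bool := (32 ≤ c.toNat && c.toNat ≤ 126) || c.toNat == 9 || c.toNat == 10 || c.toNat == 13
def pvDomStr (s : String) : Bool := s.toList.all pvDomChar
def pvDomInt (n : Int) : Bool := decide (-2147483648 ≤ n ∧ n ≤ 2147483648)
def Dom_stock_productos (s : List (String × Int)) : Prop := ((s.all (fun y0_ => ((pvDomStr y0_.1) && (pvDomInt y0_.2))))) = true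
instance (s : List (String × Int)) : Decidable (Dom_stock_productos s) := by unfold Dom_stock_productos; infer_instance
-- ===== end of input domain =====

-- B replaces A's all-pairs O(n^2) rewrite loop by one grouping pass plus min/max per group
-- (and fixes A's stale last-seen bound on the inputs described at D_ below).

-- ===== PORT A =====
-- Python's two-element list [min, max] is the pair (min, max) here; res[producto][i] = v is Dict.modify.
def aInner (pp : String × Int) (res : PySem.Dict String (Int × Int)) (pp2 : String × Int) :
    PySem.Dict String (Int × Int) :=
  if pp.1 == pp2.1 then
    let res' := if pp2.2 < pp.2 then res.modify pp.1 (0, 0) (fun mv => (pp2.2, mv.2)) else res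
    if pp2.2 > pp.2 then res'.modify pp.1 (0, 0) (fun mv => (mv.1, pp2.2)) else res'
  else res

def aOuter (s : List (String × Int)) (res : PySem.Dict String (Int × Int)) (pp : String × Int) :
    PySem.Dict String (Int × Int) :=
  List.foldl (aInner pp) res s

-- helper lista_a_tupla: rebuilds the dict converting [min,max] to (min,max) (the identity on pairs here)
def lista_a_tupla (d : PySem.Dict String (Int × Int)) : PySem.Dict String (Int × Int) :=
  List.foldl (fun r kv => r.insert kv.1 kv.2) PySem.Dict.empty d.items

def stock_productos (s : List (String × Int)) : List (String × Int × Int) :=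
  let res1 : PySem.Dict String (Int × Int) :=
    List.foldl (fun res pp => res.insert pp.1 (pp.2, pp.2)) PySem.Dict.empty s
  let res2 := List.foldl (aOuter s) res1 s
  (lista_a_tupla res2).items

-- ===== PORT B =====
def stock_productos_alt (s : List (String × Int)) : List (String × Int × Int) :=
  let grupos : PySem.Dict String (List Int) :=
    List.foldl (fun d p => d.modify p.1 [] fun x => x ++ [p.2]) PySem.Dict.empty s
  grupos.items.map (fun kv =>
    (kv.1, ((PySem.List.min? kv.2 id).getD 0, (PySem.List.max? kv.2 id).getD 0)))

-- ===== PRECONDITION & SPEC =====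
-- the prices of product p, in list order (a view of the input, used only to state D_)
def pvPrices (s : List (String × Int)) (p : String) : List Int :=
  (s.filter (fun q => q.1 == p)).map (fun q => q.2)

-- Input condition: among a product's prices, the last price listed strictly below (resp.
-- above) the final price is not the lowest (resp. highest) — some other price undercuts
-- (resp. exceeds) it.  Stated purely on the input; it computes neither program's output.
def pvStale (ps : List Int) : Bool :=
  match ps.getLast? with
  | none => false
  | some l =>
    (match (ps.filter (fun y => y < l)).getLast? with
     | none => false
     | some b => ps.any (fun y => y < b))
    || (match (ps.filter (fun y => l < y)).getLast? with
     | none => false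
     | some b => ps.any (fun y => b < y))

-- On inputs where, for some product, the last price listed strictly below (resp. above) its
-- final price is not that product's lowest (resp. highest) price, A returns that stale
-- last-seen bound (its inner loop keeps overwriting the bound with the latest qualifying
-- price), while B returns the true per-product (min, max), which is evidently the intent.
def D_stock_productos (s : List (String × Int)) : Prop :=
  (s.any (fun pp => pvStale (pvPrices s pp.1))) = true
instance (s : List (String × Int)) : Decidable (D_stock_productos s) := by
  unfold D_stock_productos; infer_instance

def Spec_stock_productos (s : List (String × Int)) (out : List (String × Int × Int)) : Prop :=
  ¬ D_stock_productos s → out = stock_productos_alt s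
instance (s : List (String × Int)) (out : List (String × Int × Int)) :
    Decidable (Spec_stock_productos s out) := by unfold Spec_stock_productos; infer_instance

def pvDiffWitness_stock_productos : (List (String × Int)) := [("p", 1), ("p", 2), ("p", 3)]
def pvDiffWitnessOut_stock_productos : (List (String × Int × Int)) × (List (String × Int × Int)) :=
  ([("p", 2, 3)], [("p", 1, 3)])

-- ===== CLAIM (what is proved, stated in full; the proofs are below) =====
def Claim_unchanged_stock_productos : Prop :=
  ∀ (s : List (String × Int)), Dom_stock_productos s → Spec_stock_productos s (stock_productos s)
def Claim_changed_stock_productos : Prop :=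
  Dom_stock_productos (pvDiffWitness_stock_productos) ∧
  D_stock_productos (pvDiffWitness_stock_productos) ∧
  stock_productos (pvDiffWitness_stock_productos) = pvDiffWitnessOut_stock_productos.1 ∧
  stock_productos_alt (pvDiffWitness_stock_productos) = pvDiffWitnessOut_stock_productos.2 ∧
  pvDiffWitnessOut_stock_productos.1 ≠ pvDiffWitnessOut_stock_productos.2
def Claim_exact_stock_productos : Prop :=
  ∀ (s : List (String × Int)), Dom_stock_productos s → D_stock_productos s →
    stock_productos s ≠ stock_productos_alt s

-- ===== LEMMAS AND PROOFS =====

-- proof-side restatement of pvStale: the stale bound differs from the true min (max)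
def pvWrong (ps : List Int) : Bool :=
  match ps.getLast? with
  | none => false
  | some l =>
    ((!(ps.filter (fun y => y < l)).isEmpty)
        && !((ps.filter (fun y => y < l)).getLast? == PySem.List.min? ps id))
    || ((!(ps.filter (fun y => l < y)).isEmpty)
        && !((ps.filter (fun y => l < y)).getLast? == PySem.List.max? ps id))

theorem minmax_foldl_isSome (step : Option Int → Int → Option Int)
    (hstep : ∀ m x, step (some m) x ≠ none) :
    ∀ (u : List Int) (a : Int), (List.foldl step (some a) u).isSome = true := by
  intro u
  induction u with
  | nil => intro a; simp
  | cons b v ih =>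
    intro a
    simp only [List.foldl_cons]
    cases hs : step (some a) b with
    | none => exact absurd hs (hstep a b)
    | some c => exact ih c

theorem min?_isSome (ps : List Int) (h : ps ≠ []) : (PySem.List.min? ps id).isSome := by
  cases ps with
  | nil => exact absurd rfl h
  | cons a t =>
    simpa [PySem.List.min?] using
      minmax_foldl_isSome _ (fun m x => by dsimp only; split <;> simp) t a

theorem max?_isSome (ps : List Int) (h : ps ≠ []) : (PySem.List.max? ps id).isSome := by
  cases ps with
  | nil => exact absurd rfl h
  | cons a t =>
    simpa [PySem.List.max?] using
      minmax_foldl_isSome _ (fun m x => by dsimp only; split <;> simp) t a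

-- min side of pvStale agrees with the min side of pvWrong (for any cut value l)
theorem stale_min_side (ps : List Int) (h : ps ≠ []) (l : Int) :
    (match (ps.filter (fun y => y < l)).getLast? with
     | none => false
     | some b => ps.any (fun y => y < b))
      = ((!(ps.filter (fun y => y < l)).isEmpty)
          && !((ps.filter (fun y => y < l)).getLast? == PySem.List.min? ps id)) := by
  obtain ⟨m, hm⟩ := Option.isSome_iff_exists.mp (min?_isSome ps h)
  cases hb : (ps.filter (fun y => y < l)).getLast? with
  | none =>
    have hE : (ps.filter (fun y => y < l)).isEmpty = true := by
      simp [List.getLast?_eq_none_iff.mp hb]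
    simp [hE]
  | some b =>
    have hbf : b ∈ ps.filter (fun y => y < l) := List.mem_of_getLast? hb
    have hbps : b ∈ ps := (List.mem_filter.mp hbf).1
    have hne : (ps.filter (fun y => y < l)).isEmpty = false := by
      cases hE : (ps.filter (fun y => y < l)).isEmpty
      · rfl
      · rw [List.isEmpty_iff.mp hE] at hbf; simp at hbf
    have key : (∃ y ∈ ps, y < b) ↔ ¬ b = m := by
      constructor
      · rintro ⟨y, hy, hyb⟩ e
        have hmy : m ≤ y := by simpa using PySem.List.min?_isMin hm y hy
        omega
      · intro hbm
        have hmb : m ≤ b := by simpa using PySem.List.min?_isMin hm b hbps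
        exact ⟨m, PySem.List.min?_mem hm, lt_of_le_of_ne hmb (fun e => hbm e.symm)⟩
    rw [hne, hm, Bool.eq_iff_iff]
    simp only [List.any_eq_true, decide_eq_true_eq, Bool.not_false, Bool.true_and,
      Bool.not_eq_true', beq_eq_false_iff_ne, ne_eq, Option.some.injEq]
    exact key

theorem stale_max_side (ps : List Int) (h : ps ≠ []) (l : Int) :
    (match (ps.filter (fun y => l < y)).getLast? with
     | none => false
     | some b => ps.any (fun y => b < y))
      = ((!(ps.filter (fun y => l < y)).isEmpty)
          && !((ps.filter (fun y => l < y)).getLast? == PySem.List.max? ps id)) := by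
  obtain ⟨m, hm⟩ := Option.isSome_iff_exists.mp (max?_isSome ps h)
  cases hb : (ps.filter (fun y => l < y)).getLast? with
  | none =>
    have hE : (ps.filter (fun y => l < y)).isEmpty = true := by
      simp [List.getLast?_eq_none_iff.mp hb]
    simp [hE]
  | some b =>
    have hbf : b ∈ ps.filter (fun y => l < y) := List.mem_of_getLast? hb
    have hbps : b ∈ ps := (List.mem_filter.mp hbf).1
    have hne : (ps.filter (fun y => l < y)).isEmpty = false := by
      cases hE : (ps.filter (fun y => l < y)).isEmpty
      · rfl
      · rw [List.isEmpty_iff.mp hE] at hbf; simp at hbf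
    have key : (∃ y ∈ ps, b < y) ↔ ¬ b = m := by
      constructor
      · rintro ⟨y, hy, hyb⟩ e
        have hmy : y ≤ m := by simpa using PySem.List.max?_isMax hm y hy
        omega
      · intro hbm
        have hmb : b ≤ m := by simpa using PySem.List.max?_isMax hm b hbps
        exact ⟨m, PySem.List.max?_mem hm, lt_of_le_of_ne hmb hbm⟩
    rw [hne, hm, Bool.eq_iff_iff]
    simp only [List.any_eq_true, decide_eq_true_eq, Bool.not_false, Bool.true_and,
      Bool.not_eq_true', beq_eq_false_iff_ne, ne_eq, Option.some.injEq]
    exact key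

theorem pvStale_eq_pvWrong (ps : List Int) : pvStale ps = pvWrong ps := by
  unfold pvStale pvWrong
  cases hl : ps.getLast? with
  | none => rfl
  | some l =>
    have h : ps ≠ [] := by
      intro hc; rw [hc] at hl; simp at hl
    dsimp only
    rw [stale_min_side ps h l, stale_max_side ps h l]

-- value-level mirror of aInner's effect on the entry of key k
def vInner (k : String) (x : Int) (mv : Int × Int) (pp2 : String × Int) : Int × Int :=
  if k == pp2.1 then
    let mv' := if pp2.2 < x then (pp2.2, mv.2) else mv
    if pp2.2 > x then (mv'.1, pp2.2) else mv'
  else mv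

-- value-level single update for one price y against reference price x
def vStep (x : Int) (mv : Int × Int) (y : Int) : Int × Int :=
  let mv' := if y < x then (y, mv.2) else mv
  if x < y then (mv'.1, y) else mv'

-- L1: loop 1 on the entry of k
theorem getD_loop1 (k : String) (s : List (String × Int)) :
    ∀ d : PySem.Dict String (Int × Int),
      (List.foldl (fun res pp => res.insert pp.1 (pp.2, pp.2)) d s).getD k (0, 0)
        = List.foldl (fun _ x => (x, x)) (d.getD k (0, 0)) (pvPrices s k) := by
  induction s with
  | nil => intro d; simp [pvPrices]
  | cons pp t ih =>
    intro d
    simp only [List.foldl_cons]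
    rw [ih]
    by_cases hk : pp.1 = k
    · simp [pvPrices, hk]
    · simp [pvPrices, PySem.Dict.getD_insert,
        show (pp.1 == k) = false from by simpa using hk,
        show ¬(k = pp.1) from fun hh => hk hh.symm]

-- one aInner step on the entry of k
theorem getD_aInner (k : String) (pp pp2 : String × Int) (d : PySem.Dict String (Int × Int)) :
    (aInner pp d pp2).getD k (0, 0)
      = if pp.1 = k then vInner k pp.2 (d.getD k (0, 0)) pp2 else d.getD k (0, 0) := by
  unfold aInner vInner
  by_cases hpk : pp.1 = k
  · subst hpk
    by_cases h12 : (pp.1 == pp2.1) = true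
    · simp only [h12, if_true]
      split_ifs <;> simp []
    · simp [h12]
  · have hkp : ¬ (k = pp.1) := fun hh => hpk hh.symm
    by_cases h12 : (pp.1 == pp2.1) = true
    · simp only [h12, if_true, if_neg hpk]
      split_ifs <;> simp [PySem.Dict.getD_modify, hkp]
    · simp [h12, hpk]

-- L2: inner loop on the entry of k
theorem getD_inner (k : String) (pp : String × Int) (s0 : List (String × Int)) :
    ∀ d : PySem.Dict String (Int × Int),
      (List.foldl (aInner pp) d s0).getD k (0, 0)
        = if pp.1 = k then List.foldl (vInner k pp.2) (d.getD k (0, 0)) s0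
          else d.getD k (0, 0) := by
  induction s0 with
  | nil => intro d; simp
  | cons pp2 t ih =>
    intro d
    simp only [List.foldl_cons]
    rw [ih, getD_aInner]
    by_cases hpk : pp.1 = k <;> simp [hpk]

-- L3: the guarded value fold over pairs is the plain fold over k's prices
theorem vInner_eq_vStep (k : String) (x : Int) (s0 : List (String × Int)) :
    ∀ mv, List.foldl (vInner k x) mv s0 = List.foldl (vStep x) mv (pvPrices s0 k) := by
  induction s0 with
  | nil => intro mv; simp [pvPrices]
  | cons pp2 t ih =>
    intro mv
    simp only [List.foldl_cons]
    rw [ih]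
    by_cases hk : k = pp2.1
    · simp [pvPrices, vInner, vStep, hk]
    · simp [pvPrices, vInner,
        show (pp2.1 == k) = false from by simpa using (Ne.symm hk),
        show (k == pp2.1) = false from by simpa using hk]

-- L4: loop 2 on the entry of k
theorem getD_loop2 (k : String) (s0 s : List (String × Int)) :
    ∀ d : PySem.Dict String (Int × Int),
      (List.foldl (aOuter s0) d s).getD k (0, 0)
        = List.foldl (fun mv x => List.foldl (vStep x) mv (pvPrices s0 k))
            (d.getD k (0, 0)) (pvPrices s k) := by
  induction s with
  | nil => intro d; simp [pvPrices]
  | cons pp t ih =>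
    intro d
    simp only [List.foldl_cons]
    rw [ih]
    show List.foldl _ ((List.foldl (aInner pp) d s0).getD k (0, 0)) _ = _
    rw [getD_inner]
    by_cases hpk : pp.1 = k
    · rw [if_pos hpk, vInner_eq_vStep]
      simp [pvPrices, hpk]
    · rw [if_neg hpk]
      simp [pvPrices, show (pp.1 == k) = false from by simpa using hpk]

-- aInner / the inner loop preserve the key list when the touched key is present
theorem keys_aInner (pp pp2 : String × Int) (d : PySem.Dict String (Int × Int))
    (hmem : pp.1 ∈ d.keys) : (aInner pp d pp2).keys = d.keys := by
  have hc : ∀ d' : PySem.Dict String (Int × Int), d'.keys = d.keys →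
      ∀ f, (d'.modify pp.1 (0, 0) f).keys = d.keys := by
    intro d' hd f
    rw [PySem.Dict.keys_modify, PySem.Dict.keys_insert_of_contains, hd]
    exact (PySem.Dict.contains_iff_mem_keys _ _).mpr (hd ▸ hmem)
  unfold aInner
  by_cases h12 : (pp.1 == pp2.1) = true
  · rw [if_pos h12]
    dsimp only
    split_ifs with h1 h2
    · exact hc _ (hc _ rfl _) _
    · exact hc _ rfl _
    · exact hc _ rfl _
    · rfl
  · rw [if_neg h12]

theorem keys_aOuter (s0 : List (String × Int)) (pp : String × Int)
    (d : PySem.Dict String (Int × Int)) (hmem : pp.1 ∈ d.keys) :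
    (aOuter s0 d pp).keys = d.keys := by
  unfold aOuter
  induction s0 generalizing d with
  | nil => simp
  | cons pp2 t ih =>
    simp only [List.foldl_cons]
    have h1 := keys_aInner pp pp2 d hmem
    rw [ih _ (h1 ▸ hmem), h1]

-- keys are preserved by loop 2 (every touched key is already present)
theorem keys_loop2 (s0 s : List (String × Int)) :
    ∀ d : PySem.Dict String (Int × Int), (∀ pp ∈ s, pp.1 ∈ d.keys) →
      (List.foldl (aOuter s0) d s).keys = d.keys := by
  induction s with
  | nil => intro d _; simp
  | cons pp t ih =>
    intro d hmem
    simp only [List.foldl_cons]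
    have hstep : (aOuter s0 d pp).keys = d.keys :=
      keys_aOuter s0 pp d (hmem pp (by simp))
    rw [ih _ (fun q hq => by rw [hstep]; exact hmem q (by simp [hq])), hstep]

-- S1: loop 1's value fold gives (last, last)
theorem foldl_pair_last (ps : List Int) :
    ∀ v0 : Int × Int,
      List.foldl (fun _ x => (x, x)) v0 ps = (ps.getLast?.getD v0.1, ps.getLast?.getD v0.2) := by
  induction ps with
  | nil => intro v0; simp
  | cons a t ih =>
    intro v0
    simp only [List.foldl_cons]
    rw [ih]
    simp [List.getLast?_cons]

-- S2: one inner pass in closed form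
theorem foldl_vStep (x : Int) (ps : List Int) :
    ∀ mv, List.foldl (vStep x) mv ps
      = ((ps.filter (fun y => y < x)).getLast?.getD mv.1,
         (ps.filter (fun y => x < y)).getLast?.getD mv.2) := by
  induction ps with
  | nil => intro mv; simp
  | cons y t ih =>
    intro mv
    simp only [List.foldl_cons]
    rw [ih]
    rcases lt_trichotomy y x with hlt | heq | hgt
    · simp [vStep, hlt, not_lt.mpr (le_of_lt hlt), List.getLast?_cons]
    · simp [vStep, heq]
    · simp [vStep, hgt, not_lt.mpr (le_of_lt hgt), List.getLast?_cons]

-- componentwise split of a product fold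
theorem foldl_prod_split (F G : Int → Int → Int) (ps : List Int) :
    ∀ (a b : Int), List.foldl (fun (mv : Int × Int) x => (F x mv.1, G x mv.2)) (a, b) ps
      = (List.foldl (fun m x => F x m) a ps, List.foldl (fun m x => G x m) b ps) := by
  induction ps with
  | nil => intro a b; simp
  | cons x t ih => intro a b; simp only [List.foldl_cons]; exact ih _ _

-- a fold whose every step fixes the accumulator
theorem foldl_fixed {α β : Type} (step : β → α → β) (a : β) (ps : List α)
    (h : ∀ x ∈ ps, step a x = a) : List.foldl step a ps = a := by
  induction ps with
  | nil => simp
  | cons x t ih =>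
    simp only [List.foldl_cons, h x (by simp)]
    exact ih (fun y hy => h y (by simp [hy]))

-- the last element of a list survives filtering when it satisfies the predicate
theorem getLast?_filter_of_getLast (ps : List Int) (p : Int → Bool) (l : Int)
    (hl : ps.getLast? = some l) (hp : p l = true) :
    (ps.filter p).getLast? = some l := by
  induction ps with
  | nil => simp at hl
  | cons a t ih =>
    cases t with
    | nil =>
      simp at hl; subst hl
      simp [hp]
    | cons b u =>
      rw [List.getLast?_cons_cons] at hl
      have ht := ih hl
      rw [List.filter_cons]
      by_cases ha : p a = true
      · rw [if_pos (by simp [ha]), List.getLast?_cons, ht]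
        simp
      · simp only [Bool.not_eq_true] at ha
        simp [ha, ht]

-- the final step of a left fold over a nonempty list
theorem foldl_last {α : Type} (step : Int → α → Int) (ps : List α) (h : ps ≠ []) (a : Int) :
    List.foldl step a ps = step (List.foldl step a ps.dropLast) (ps.getLast h) := by
  conv_lhs => rw [← List.dropLast_append_getLast h]
  rw [List.foldl_append]
  rfl

-- A's final lower bound equals the true min when pvWrong's min half fails
theorem min_component (ps : List Int) (h : ps ≠ [])
    (hw : ((!(ps.filter (fun y => y < ps.getLast h)).isEmpty)
        && (!((ps.filter (fun y => y < ps.getLast h)).getLast? == PySem.List.min? ps id))) = false) :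
    List.foldl (fun m x => (ps.filter (fun y => y < x)).getLast?.getD m) (ps.getLast h) ps
      = (PySem.List.min? ps id).getD 0 := by
  by_cases hf : ps.filter (fun y => y < ps.getLast h) = []
  · obtain ⟨m, hm⟩ := Option.isSome_iff_exists.mp (min?_isSome ps h)
    have hmem := PySem.List.min?_mem hm
    have hle : m ≤ ps.getLast h := by
      simpa using PySem.List.min?_isMin hm (ps.getLast h) (List.getLast_mem h)
    have hnl : ∀ y ∈ ps, ¬ (y < ps.getLast h) := by
      intro y hy
      simpa using List.filter_eq_nil_iff.mp hf y hy
    have hml : m = ps.getLast h := le_antisymm hle (not_lt.mp (hnl m hmem))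
    rw [hm, hml]
    simp only [Option.getD_some]
    apply foldl_fixed
    intro x hx
    by_cases hfx : ps.filter (fun y => y < x) = []
    · simp [hfx]
    · have hlx : ps.getLast h < x := by
        obtain ⟨y, hy⟩ := List.exists_mem_of_ne_nil _ hfx
        obtain ⟨hyps, hylt⟩ := List.mem_filter.mp hy
        by_contra hnlx
        exact hnl y hyps (lt_of_lt_of_le (by simpa using hylt) (not_lt.mp hnlx))
      rw [getLast?_filter_of_getLast ps (fun y => decide (y < x)) (ps.getLast h)
        (List.getLast?_eq_some_getLast h) (by simpa using hlx)]
      simp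
  · have heq : (ps.filter (fun y => y < ps.getLast h)).getLast? = PySem.List.min? ps id := by
      rcases Bool.and_eq_false_iff.mp hw with h1 | h2
      · simp only [Bool.not_eq_false'] at h1
        exact absurd (List.isEmpty_iff.mp h1) hf
      · simpa [beq_iff_eq] using h2
    rw [foldl_last _ ps h, heq]
    obtain ⟨m, hm⟩ := Option.isSome_iff_exists.mp (min?_isSome ps h)
    rw [hm]
    simp

theorem max_component (ps : List Int) (h : ps ≠ [])
    (hw : ((!(ps.filter (fun y => ps.getLast h < y)).isEmpty)
        && (!((ps.filter (fun y => ps.getLast h < y)).getLast? == PySem.List.max? ps id))) = false) :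
    List.foldl (fun m x => (ps.filter (fun y => x < y)).getLast?.getD m) (ps.getLast h) ps
      = (PySem.List.max? ps id).getD 0 := by
  by_cases hf : ps.filter (fun y => ps.getLast h < y) = []
  · obtain ⟨m, hm⟩ := Option.isSome_iff_exists.mp (max?_isSome ps h)
    have hmem := PySem.List.max?_mem hm
    have hle : ps.getLast h ≤ m := by
      simpa using PySem.List.max?_isMax hm (ps.getLast h) (List.getLast_mem h)
    have hnl : ∀ y ∈ ps, ¬ (ps.getLast h < y) := by
      intro y hy
      simpa using List.filter_eq_nil_iff.mp hf y hy
    have hml : m = ps.getLast h := le_antisymm (not_lt.mp (hnl m hmem)) hle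
    rw [hm, hml]
    simp only [Option.getD_some]
    apply foldl_fixed
    intro x hx
    by_cases hfx : ps.filter (fun y => x < y) = []
    · simp [hfx]
    · have hlx : x < ps.getLast h := by
        obtain ⟨y, hy⟩ := List.exists_mem_of_ne_nil _ hfx
        obtain ⟨hyps, hylt⟩ := List.mem_filter.mp hy
        by_contra hnlx
        exact hnl y hyps (lt_of_le_of_lt (not_lt.mp hnlx) (by simpa using hylt))
      rw [getLast?_filter_of_getLast ps (fun y => decide (x < y)) (ps.getLast h)
        (List.getLast?_eq_some_getLast h) (by simpa using hlx)]
      simp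
  · have heq : (ps.filter (fun y => ps.getLast h < y)).getLast? = PySem.List.max? ps id := by
      rcases Bool.and_eq_false_iff.mp hw with h1 | h2
      · simp only [Bool.not_eq_false'] at h1
        exact absurd (List.isEmpty_iff.mp h1) hf
      · simpa [beq_iff_eq] using h2
    rw [foldl_last _ ps h, heq]
    obtain ⟨m, hm⟩ := Option.isSome_iff_exists.mp (max?_isSome ps h)
    rw [hm]
    simp

-- A's entry for k, in closed double-fold form
theorem entryA_eq (s : List (String × Int)) (k : String) :
    (List.foldl (aOuter s)
        (List.foldl (fun res pp => res.insert pp.1 (pp.2, pp.2)) PySem.Dict.empty s) s).getD k (0, 0)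
      = List.foldl (fun mv x => List.foldl (vStep x) mv (pvPrices s k))
          (List.foldl (fun _ x => (x, x)) ((0 : Int), (0 : Int)) (pvPrices s k)) (pvPrices s k) := by
  rw [getD_loop2, getD_loop1]
  simp [PySem.Dict.getD_empty]

theorem pvPrices_ne_nil (s : List (String × Int)) (pp : String × Int) (hpp : pp ∈ s) :
    pvPrices s pp.1 ≠ [] := by
  intro hc
  unfold pvPrices at hc
  have := List.filter_eq_nil_iff.mp (List.map_eq_nil_iff.mp hc) pp hpp
  simp at this

-- the two item lists, as maps over the shared key list
theorem itemsA (s : List (String × Int)) :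
    stock_productos s
      = (PySem.Set.ofList (s.map Prod.fst)).map (fun k =>
          (k, List.foldl (fun mv x => List.foldl (vStep x) mv (pvPrices s k))
                (List.foldl (fun _ x => (x, x)) ((0 : Int), (0 : Int)) (pvPrices s k))
                (pvPrices s k))) := by
  have hkeys1 : (List.foldl (fun res pp => res.insert pp.1 (pp.2, pp.2))
      (PySem.Dict.empty : PySem.Dict String (Int × Int)) s).keys
      = PySem.Set.ofList (s.map Prod.fst) := by
    rw [PySem.Dict.keys_foldl_insert_key s Prod.fst (fun _ pp => (pp.2, pp.2)) PySem.Dict.empty]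
    simp [PySem.Dict.keys_empty, PySem.Set.update, PySem.Set.ofList]
  have hnd1 := PySem.Dict.nodup_keys_foldl_insert_key s Prod.fst (fun _ pp => (pp.2, pp.2))
      (PySem.Dict.empty : PySem.Dict String (Int × Int)) (by simp [PySem.Dict.keys_empty])
  have hmem1 : ∀ pp ∈ s, pp.1 ∈ (List.foldl (fun res pp => res.insert pp.1 (pp.2, pp.2))
      (PySem.Dict.empty : PySem.Dict String (Int × Int)) s).keys := by
    rw [hkeys1]
    intro pp hpp
    exact (PySem.Set.mem_ofList _ _).mpr (List.mem_map_of_mem hpp)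
  have hkeys2 : (List.foldl (aOuter s) (List.foldl (fun res pp => res.insert pp.1 (pp.2, pp.2))
      (PySem.Dict.empty : PySem.Dict String (Int × Int)) s) s).keys
      = PySem.Set.ofList (s.map Prod.fst) := by
    rw [keys_loop2 s s _ hmem1, hkeys1]
  have hnd2 : (List.foldl (aOuter s) (List.foldl (fun res pp => res.insert pp.1 (pp.2, pp.2))
      (PySem.Dict.empty : PySem.Dict String (Int × Int)) s) s).keys.Nodup := by
    rw [keys_loop2 s s _ hmem1]
    exact hnd1
  show (lista_a_tupla _).items = _
  have hlt : ∀ d : PySem.Dict String (Int × Int), d.keys.Nodup → (lista_a_tupla d).items = d.items := by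
    intro d hnd
    unfold lista_a_tupla
    rw [PySem.Dict.items_foldl_insert_fresh d.items Prod.fst Prod.snd PySem.Dict.empty
      (fun a _ => PySem.Dict.contains_empty a.1) hnd]
    simp [show (PySem.Dict.empty : PySem.Dict String (Int × Int)).items = [] from rfl]
  rw [hlt _ hnd2, PySem.Dict.items_eq_map_keys _ hnd2 (0, 0), hkeys2]
  exact List.map_congr_left (fun k _ => by rw [entryA_eq])

theorem itemsB (s : List (String × Int)) :
    stock_productos_alt s
      = (PySem.Set.ofList (s.map Prod.fst)).map (fun k =>
          (k, ((PySem.List.min? (pvPrices s k) id).getD 0,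
               (PySem.List.max? (pvPrices s k) id).getD 0))) := by
  show ((List.foldl (fun d p => d.modify p.1 [] fun x => x ++ [p.2])
      (PySem.Dict.empty : PySem.Dict String (List Int)) s).items.map _) = _
  have hkeys : (List.foldl (fun d p => d.modify p.1 [] fun x => x ++ [p.2])
      (PySem.Dict.empty : PySem.Dict String (List Int)) s).keys
      = PySem.Set.ofList (s.map Prod.fst) := by
    rw [PySem.Dict.keys_foldl_modify_key s Prod.fst [] (fun _ p => fun x => x ++ [p.2])
      PySem.Dict.empty]
    simp [PySem.Dict.keys_empty, PySem.Set.update, PySem.Set.ofList]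
  have hnd := PySem.Dict.nodup_keys_foldl_modify_key s Prod.fst [] (fun _ p => fun x => x ++ [p.2])
      (PySem.Dict.empty : PySem.Dict String (List Int)) (by simp [PySem.Dict.keys_empty])
  rw [PySem.Dict.items_eq_map_keys _ hnd [], hkeys, List.map_map]
  apply List.map_congr_left
  intro k _
  have hg := PySem.Dict.getD_foldl_modify_append s
      (PySem.Dict.empty : PySem.Dict String (List Int)) k
  simp only [Function.comp, hg, PySem.Dict.getD_empty, List.nil_append]
  rfl

-- per-product agreement when pvWrong fails
theorem entry_agree (ps : List Int) (h : ps ≠ []) (hw : pvWrong ps = false) :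
    List.foldl (fun mv x => List.foldl (vStep x) mv ps)
        (List.foldl (fun _ x => (x, x)) ((0 : Int), (0 : Int)) ps) ps
      = ((PySem.List.min? ps id).getD 0, (PySem.List.max? ps id).getD 0) := by
  have hl : ps.getLast? = some (ps.getLast h) := List.getLast?_eq_some_getLast h
  rw [foldl_pair_last, hl]
  simp only [Option.getD_some]
  have hstep : (fun (mv : Int × Int) (x : Int) => List.foldl (vStep x) mv ps)
      = fun (mv : Int × Int) (x : Int) =>
          ((ps.filter (fun y => y < x)).getLast?.getD mv.1,
           (ps.filter (fun y => x < y)).getLast?.getD mv.2) := by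
    funext mv x
    rw [foldl_vStep]
  rw [hstep, foldl_prod_split (fun x m => (ps.filter (fun y => y < x)).getLast?.getD m)
    (fun x m => (ps.filter (fun y => x < y)).getLast?.getD m) ps]
  unfold pvWrong at hw
  rw [hl] at hw
  simp only [Bool.or_eq_false_iff] at hw
  rw [min_component ps h hw.1, max_component ps h hw.2]

-- per-product disagreement when pvWrong holds
theorem entry_differ (ps : List Int) (h : ps ≠ []) (hw : pvWrong ps = true) :
    List.foldl (fun mv x => List.foldl (vStep x) mv ps)
        (List.foldl (fun _ x => (x, x)) ((0 : Int), (0 : Int)) ps) ps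
      ≠ ((PySem.List.min? ps id).getD 0, (PySem.List.max? ps id).getD 0) := by
  have hl : ps.getLast? = some (ps.getLast h) := List.getLast?_eq_some_getLast h
  rw [foldl_pair_last, hl]
  simp only [Option.getD_some]
  have hstep : (fun (mv : Int × Int) (x : Int) => List.foldl (vStep x) mv ps)
      = fun (mv : Int × Int) (x : Int) =>
          ((ps.filter (fun y => y < x)).getLast?.getD mv.1,
           (ps.filter (fun y => x < y)).getLast?.getD mv.2) := by
    funext mv x
    rw [foldl_vStep]
  rw [hstep, foldl_prod_split (fun x m => (ps.filter (fun y => y < x)).getLast?.getD m)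
    (fun x m => (ps.filter (fun y => x < y)).getLast?.getD m) ps]
  unfold pvWrong at hw
  rw [hl] at hw
  simp only [Bool.or_eq_true, Bool.and_eq_true, Bool.not_eq_true',
    List.isEmpty_eq_false_iff, beq_eq_false_iff_ne] at hw
  intro hcontra
  rw [Prod.mk.injEq] at hcontra
  rcases hw with ⟨hfne, hne⟩ | ⟨hfne, hne⟩
  · obtain ⟨v, hv⟩ := Option.isSome_iff_exists.mp
      (List.getLast?_isSome.mpr hfne)
    obtain ⟨m, hm⟩ := Option.isSome_iff_exists.mp (min?_isSome ps h)
    have h1 : List.foldl (fun m x => (ps.filter (fun y => y < x)).getLast?.getD m)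
        (ps.getLast h) ps = v := by
      rw [foldl_last _ ps h, hv]
      simp
    rw [h1, hm] at hcontra
    rw [hv, hm] at hne
    exact hne (by simpa using hcontra.1)
  · obtain ⟨v, hv⟩ := Option.isSome_iff_exists.mp
      (List.getLast?_isSome.mpr hfne)
    obtain ⟨m, hm⟩ := Option.isSome_iff_exists.mp (max?_isSome ps h)
    have h1 : List.foldl (fun m x => (ps.filter (fun y => x < y)).getLast?.getD m)
        (ps.getLast h) ps = v := by
      rw [foldl_last _ ps h, hv]
      simp
    rw [h1, hm] at hcontra
    rw [hv, hm] at hne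
    exact hne (by simpa using hcontra.2)

-- ===== VERDICT (by name: the statement is the Claim_ definition above) =====
theorem stock_productos_spec : Claim_unchanged_stock_productos := by
  intro s _
  unfold Spec_stock_productos
  intro hnD
  unfold D_stock_productos at hnD
  simp only [List.any_eq_true, not_exists, not_and, Bool.not_eq_true] at hnD
  rw [itemsA, itemsB]
  apply List.map_congr_left
  intro k hk
  obtain ⟨pp, hpp, rfl⟩ := List.mem_map.mp ((PySem.Set.mem_ofList _ _).mp hk)
  have hw : pvWrong (pvPrices s pp.1) = false := by
    rw [← pvStale_eq_pvWrong]; exact hnD pp hpp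
  exact congrArg _ (entry_agree _ (pvPrices_ne_nil s pp hpp) hw)

theorem stock_productos_changed : Claim_changed_stock_productos := by
  unfold Claim_changed_stock_productos; decide

theorem stock_productos_tight : Claim_exact_stock_productos := by
  intro s _ hD
  unfold D_stock_productos at hD
  simp only [List.any_eq_true] at hD
  obtain ⟨pp, hpp, hst⟩ := hD
  have hw : pvWrong (pvPrices s pp.1) = true := by
    rw [← pvStale_eq_pvWrong]; exact hst
  rw [itemsA, itemsB]
  intro hcontra
  have hk : pp.1 ∈ PySem.Set.ofList (s.map Prod.fst) :=
    (PySem.Set.mem_ofList _ _).mpr (List.mem_map_of_mem hpp)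
  have := (List.map_inj_left.mp hcontra) pp.1 hk
  exact entry_differ _ (pvPrices_ne_nil s pp hpp) hw (by simpa using this)
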